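-- pv_equiv track=rewrite | github.com/BSidesSF/ctf-2021-release | netmatroyshka/solution/solution.py | parse_pack_info
-- ===== SOURCE A (Python) =====
-- def parse_pack_info(buf):
--     n = buf[0]
--     t = (n & 0x70) >> 4
--     lb = [n & 0b1111]
--     buf = buf[1:]
--     while n & 0x80:
--         n = buf[0]
--         buf = buf[1:]
--         lb = [n & 0x7f] + lb
--     l = 0
--     for b in lb[:len(lb)-1]:
--         l = l << 7
--         l |= b
--     l = l << 4
--     l |= lb[len(lb)-1]
--     return t, l, buf
-- ===== SOURCE B (Python) =====
-- def parse_pack_info(buf):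
--     n = buf[0]
--     t = (n & 0x70) >> 4
--     length = n & 0xf
--     shift = 4
--     rest = buf[1:]
--     while n & 0x80:
--         n = rest[0]
--         rest = rest[1:]
--         length |= (n & 0x7f) << shift
--         shift += 7
--     return t, length, rest
-- ===== Notes on version B (the rewrite author's own statement) =====
-- stated objective: simpler
-- what changed: B replaces A's prepend-built list of length bytes plus a second folding loop over it by a single pass that accumulates the length directly with a running bit-shift, and returns the remainder as it goes.
import Mathlib
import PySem

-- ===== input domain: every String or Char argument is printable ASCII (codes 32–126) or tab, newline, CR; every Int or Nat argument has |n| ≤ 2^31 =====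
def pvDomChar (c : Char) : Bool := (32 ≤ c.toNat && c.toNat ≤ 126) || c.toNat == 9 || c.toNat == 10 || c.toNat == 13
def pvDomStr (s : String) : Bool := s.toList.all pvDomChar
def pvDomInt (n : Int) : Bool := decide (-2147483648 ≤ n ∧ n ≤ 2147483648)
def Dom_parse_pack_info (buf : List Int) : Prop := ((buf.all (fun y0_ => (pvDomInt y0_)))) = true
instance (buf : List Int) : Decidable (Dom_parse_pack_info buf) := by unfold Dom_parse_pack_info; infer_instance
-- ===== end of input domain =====

-- B replaces A's prepend-to-a-list loop plus second folding loop by a single pass with a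
-- running shift accumulator (objective: simpler — no intermediate list, one loop).

-- ===== PORT A =====
-- A's while loop: consumes bytes while the 0x80 bit of the previous byte is set,
-- prepending the masked byte to lb.  On buf = [] Python raises IndexError (outside Pre_).
def pvLoopA (n : Int) (buf : List Int) (lb : List Int) : List Int × List Int :=
  if PySem.Int.band n 128 ≠ 0 then
    match buf with
    | [] => (lb, [])          -- Python raises IndexError here; excluded by Pre_
    | m :: rest => pvLoopA m rest (PySem.Int.band m 127 :: lb)
  else (lb, buf)

-- A's trailing fold: l over lb[:len(lb)-1] (slice with nonnegative stop = take), then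
-- l = l<<4 | lb[len(lb)-1] (index len-1 ≥ 0; lb is never empty so .getD 0 is never used).
def pvFinishA (lb : List Int) : Int :=
  let l := (List.take (lb.length - 1) lb).foldl (fun l b => PySem.Int.bor (l <<< (7:Nat)) b) 0
  PySem.Int.bor (l <<< (4:Nat)) ((PySem.List.pyGet? lb ((lb.length : Int) - 1)).getD 0)

def parse_pack_info (buf : List Int) : Int × Int × List Int :=
  match buf with
  | [] => (0, 0, [])          -- Python: buf[0] raises IndexError; excluded by Pre_
  | n :: rest =>
    let t := (PySem.Int.band n 112) >>> (4:Nat)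
    let r := pvLoopA n rest [PySem.Int.band n 15]
    (t, pvFinishA r.1, r.2)

-- ===== PORT B =====
-- B's single loop: running length/shift accumulators, no intermediate list.
def pvLoopB (n : Int) (rest : List Int) (length : Int) (shift : Nat) : Int × List Int :=
  if PySem.Int.band n 128 ≠ 0 then
    match rest with
    | [] => (length, [])      -- Python: rest[0] raises IndexError; excluded by Pre_
    | m :: rs => pvLoopB m rs (PySem.Int.bor length ((PySem.Int.band m 127) <<< shift)) (shift + 7)
  else (length, rest)

def parse_pack_info_alt (buf : List Int) : Int × Int × List Int :=
  match buf with
  | [] => (0, 0, [])          -- Python: buf[0] raises IndexError; excluded by Pre_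
  | n :: rest =>
    let t := (PySem.Int.band n 112) >>> (4:Nat)
    let q := pvLoopB n rest (PySem.Int.band n 15) 4
    (t, q.1, q.2)

-- ===== PRECONDITION & SPEC =====
-- Python A raises IndexError iff buf is empty or every byte has the 0x80 bit set
-- (the loop runs off the end); Pre_ is exactly the complement.
def Pre_parse_pack_info (buf : List Int) : Prop := ∃ b ∈ buf, PySem.Int.band b 128 = 0
instance (buf : List Int) : Decidable (Pre_parse_pack_info buf) := by
  unfold Pre_parse_pack_info; infer_instance

def pvWitness_parse_pack_info : List Int := [5]

def Spec_parse_pack_info (buf : List Int) (out : Int × Int × List Int) : Prop := out = parse_pack_info_alt buf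
instance (buf : List Int) (out : Int × Int × List Int) : Decidable (Spec_parse_pack_info buf out) := by unfold Spec_parse_pack_info; infer_instance

-- ===== CLAIM (what is proved, stated in full; the proofs are below) =====
def Claim_equal_parse_pack_info : Prop := ∀ (buf : List Int), Dom_parse_pack_info buf → Pre_parse_pack_info buf → Spec_parse_pack_info buf (parse_pack_info buf)

-- ===== LEMMAS AND PROOFS =====

-- the value of the length bytes cs (head most significant), base 128
def pvNum : List Int → Int
  | [] => 0
  | c :: cs => c * (128 : Int) ^ cs.length + pvNum cs

theorem pv_band_nonneg (a m : Int) (hm : 0 ≤ m) : 0 ≤ PySem.Int.band a m := by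
  rw [PySem.Int.band_comm]; exact PySem.Int.band_nonneg_of_nonneg_left a hm

theorem pv_band_le (a m : Int) (hm : 0 ≤ m) : PySem.Int.band a m ≤ m := by
  rw [PySem.Int.band.eq_1]
  have h1 := Nat.and_le_right (n := a.toNat) (m := m.toNat)
  have h2 := Nat.sub_le m.toNat (m.toNat &&& (-a - 1).toNat)
  split_ifs <;> omega

theorem pv_nat_lor_shift (x y k : Nat) (hy : y < 2 ^ k) : (x <<< k) ||| y = x <<< k + y := by
  induction k generalizing x y with
  | zero => interval_cases y; simp
  | succ k ih =>
    have hy2 : y / 2 < 2 ^ k := by omega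
    have e1 : x <<< (k + 1) = Nat.bit false (x <<< k) := by
      simp [Nat.bit, Nat.shiftLeft_eq, pow_succ]; ring
    rcases Nat.mod_two_eq_zero_or_one y with h | h
    · have e2 : y = Nat.bit false (y / 2) := by simp [Nat.bit]; omega
      rw [e1, e2, Nat.lor_bit, ih _ _ hy2]
      simp [Nat.bit]; omega
    · have e2 : y = Nat.bit true (y / 2) := by simp [Nat.bit]; omega
      rw [e1, e2, Nat.lor_bit, ih _ _ hy2]
      simp [Nat.bit]; omega

-- bitwise-or of disjoint nonnegative pieces is addition
theorem pv_bor_shift (a b : Int) (k : Nat) (ha : 0 ≤ a) (hb0 : 0 ≤ b) (hb : b < 2 ^ k) :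
    PySem.Int.bor (a <<< k) b = a * 2 ^ k + b := by
  have hsh : a <<< k = a * 2 ^ k := by simp [Int.shiftLeft_eq]
  have hcast : a * 2 ^ k = ((a.toNat * 2 ^ k : Nat) : Int) := by
    push_cast [Int.toNat_of_nonneg ha]; ring
  have hsh0 : 0 ≤ a <<< k := by rw [hsh]; positivity
  have htn : (a <<< k).toNat = a.toNat <<< k := by
    rw [hsh, hcast, Int.toNat_natCast, Nat.shiftLeft_eq]
  have hbn : b.toNat < 2 ^ k := by
    have : ((2 ^ k : Nat) : Int) = 2 ^ k := by push_cast; ring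
    omega
  rw [PySem.Int.bor_of_nonneg hsh0 hb0, htn, pv_nat_lor_shift _ _ _ hbn]
  push_cast [Nat.shiftLeft_eq, Int.toNat_of_nonneg ha, Int.toNat_of_nonneg hb0]
  ring

theorem pvNum_bounds (cs : List Int) (h : ∀ c ∈ cs, 0 ≤ c ∧ c < 128) :
    0 ≤ pvNum cs ∧ pvNum cs < 128 ^ cs.length := by
  induction cs with
  | nil => simp [pvNum]
  | cons c cs ih =>
    have hc := h c (by simp)
    have ih' := ih (fun x hx => h x (by simp [hx]))
    have hp : (0:Int) < 128 ^ cs.length := by positivity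
    have hcp : c * (128:Int) ^ cs.length ≤ 127 * 128 ^ cs.length :=
      mul_le_mul_of_nonneg_right (by omega) (le_of_lt hp)
    have hcp0 : 0 ≤ c * (128:Int) ^ cs.length := mul_nonneg hc.1 (le_of_lt hp)
    constructor
    · simp only [pvNum]; omega
    · simp only [pvNum, List.length_cons, pow_succ]
      nlinarith [ih'.2]

-- 2^(7l+4) = 16 * 128^l
theorem pv_pow_eq (l : Nat) : (2:Int) ^ (7 * l + 4) = 16 * 128 ^ l := by
  rw [pow_add]
  norm_num
  rw [pow_mul]
  norm_num [mul_comm]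

-- A's trailing fold over bounded digits computes the base-128 value
theorem pv_foldA (cs : List Int) (h : ∀ c ∈ cs, 0 ≤ c ∧ c < 128) :
    ∀ a : Int, 0 ≤ a →
      cs.foldl (fun l b => PySem.Int.bor (l <<< (7:Nat)) b) a = a * 128 ^ cs.length + pvNum cs := by
  induction cs with
  | nil => intro a _; simp [pvNum]
  | cons c cs ih =>
    intro a ha
    have hc := h c (by simp)
    have hstep : PySem.Int.bor (a <<< (7:Nat)) c = a * 128 + c := by
      rw [pv_bor_shift a c 7 ha hc.1 (by norm_num [hc.2])]; norm_num
    simp only [List.foldl_cons, hstep]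
    rw [ih (fun x hx => h x (by simp [hx])) (a * 128 + c) (by omega)]
    simp only [pvNum, List.length_cons, pow_succ]
    ring

theorem pv_finishA (cs : List Int) (nib : Int) (h : ∀ c ∈ cs, 0 ≤ c ∧ c < 128)
    (h0 : 0 ≤ nib) (h16 : nib < 16) :
    pvFinishA (cs ++ [nib]) = pvNum cs * 16 + nib := by
  unfold pvFinishA
  have hlen : (cs ++ [nib]).length - 1 = cs.length := by simp
  have hidx : ((cs ++ [nib]).length : Int) - 1 = (cs.length : Int) := by
    simp [List.length_append]
  rw [hlen, hidx, List.take_left, PySem.List.pyGet?_append_length]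
  have hnum := pvNum_bounds cs h
  rw [pv_foldA cs h 0 le_rfl]
  simp only [Option.getD_some, zero_mul, zero_add]
  rw [pv_bor_shift (pvNum cs) nib 4 hnum.1 h0 (by norm_num [h16])]
  norm_num

-- the two loops simulate each other
theorem pv_loops (buf : List Int) : ∀ (n : Int) (cs : List Int) (nib : Int),
    (∀ c ∈ cs, 0 ≤ c ∧ c < 128) → 0 ≤ nib → nib < 16 →
    ∃ cs' rest',
      pvLoopA n buf (cs ++ [nib]) = (cs' ++ [nib], rest') ∧
      (∀ c ∈ cs', 0 ≤ c ∧ c < 128) ∧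
      pvLoopB n buf (pvNum cs * 16 + nib) (7 * cs.length + 4) = (pvNum cs' * 16 + nib, rest') := by
  induction buf with
  | nil =>
    intro n cs nib h h0 h16
    refine ⟨cs, [], ?_, h, ?_⟩
    · conv_lhs => rw [pvLoopA]
      split_ifs <;> rfl
    · conv_lhs => rw [pvLoopB]
      split_ifs <;> rfl
  | cons m rest ih =>
    intro n cs nib h h0 h16
    by_cases hn : PySem.Int.band n 128 ≠ 0
    · -- one more byte consumed by both loops
      have hm0 : 0 ≤ PySem.Int.band m 127 := pv_band_nonneg m 127 (by norm_num)
      have hm1 : PySem.Int.band m 127 < 128 :=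
        lt_of_le_of_lt (pv_band_le m 127 (by norm_num)) (by norm_num)
      have hA : pvLoopA n (m :: rest) (cs ++ [nib])
          = pvLoopA m rest ((PySem.Int.band m 127 :: cs) ++ [nib]) := by
        conv_lhs => rw [pvLoopA]
        rw [if_pos hn]
        rfl
      have hnum := pvNum_bounds cs h
      have hlen : PySem.Int.bor (pvNum cs * 16 + nib)
            ((PySem.Int.band m 127) <<< (7 * cs.length + 4))
          = pvNum (PySem.Int.band m 127 :: cs) * 16 + nib := by
        rw [PySem.Int.bor_comm,
            pv_bor_shift (PySem.Int.band m 127) (pvNum cs * 16 + nib) (7 * cs.length + 4)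
              hm0 (by omega) (by rw [pv_pow_eq]; omega)]
        simp only [pvNum]
        rw [pv_pow_eq]
        ring
      have hB : pvLoopB n (m :: rest) (pvNum cs * 16 + nib) (7 * cs.length + 4)
          = pvLoopB m rest (pvNum (PySem.Int.band m 127 :: cs) * 16 + nib)
              (7 * (PySem.Int.band m 127 :: cs).length + 4) := by
        have hsh : (7 * cs.length + 4) + 7 = 7 * (PySem.Int.band m 127 :: cs).length + 4 := by
          simp only [List.length_cons]; omega
        conv_lhs => rw [pvLoopB]
        rw [if_pos hn]
        show pvLoopB m rest (PySem.Int.bor (pvNum cs * 16 + nib)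
              ((PySem.Int.band m 127) <<< (7 * cs.length + 4))) ((7 * cs.length + 4) + 7) = _
        rw [hlen, hsh]
      obtain ⟨cs', rest', e1, e2, e3⟩ :=
        ih m (PySem.Int.band m 127 :: cs) nib
          (by intro c hc
              rcases List.mem_cons.mp hc with rfl | hc
              · exact ⟨hm0, hm1⟩
              · exact h c hc) h0 h16
      exact ⟨cs', rest', by rw [hA, e1], e2, by rw [hB, e3]⟩
    · -- loop exits immediately in both programs
      refine ⟨cs, m :: rest, ?_, h, ?_⟩
      · conv_lhs => rw [pvLoopA]
        simp [hn]
      · conv_lhs => rw [pvLoopB]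
        simp [hn]

-- ===== VERDICT (by name: the statement is the Claim_ definition above) =====
theorem parse_pack_info_spec : Claim_equal_parse_pack_info := by
  intro buf _ _
  unfold Spec_parse_pack_info parse_pack_info parse_pack_info_alt
  match buf with
  | [] => rfl
  | n :: rest =>
    have h0 : 0 ≤ PySem.Int.band n 15 := pv_band_nonneg n 15 (by norm_num)
    have h16 : PySem.Int.band n 15 < 16 :=
      lt_of_le_of_lt (pv_band_le n 15 (by norm_num)) (by norm_num)
    obtain ⟨cs', rest', e1, e2, e3⟩ :=
      pv_loops rest n [] (PySem.Int.band n 15) (by simp) h0 h16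
    simp only [List.nil_append] at e1
    simp only [pvNum, zero_mul, zero_add, List.length_nil, Nat.mul_zero] at e3
    simp only [e1, e3, pv_finishA cs' (PySem.Int.band n 15) e2 h0 h16]
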